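-- pv_equiv track=rewrite | github.com/cirosantilli/project-euler-solvers | solvers/632.py | max_possible_k
-- ===== SOURCE A (Python) =====
-- def max_possible_k(sqrt_n: int, primes_small: list[int]) -> int:
--     """Maximum k such that product of first k primes <= sqrt_n."""
--     prod = 1
--     k = 0
--     for p in primes_small:
--         if prod * p <= sqrt_n:
--             prod *= p
--             k += 1
--         else:
--             break
--     return k
-- ===== SOURCE B (Python) =====
-- def max_possible_k(sqrt_n: int, primes_small: list[int]) -> int:
--     """Maximum k such that product of first k primes <= sqrt_n."""
--     # Stage 1: full cumulative-product table (no early exit).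
--     prods = []
--     acc = 1
--     for p in primes_small:
--         acc *= p
--         prods.append(acc)
--     # Stage 2: first index whose cumulative product exceeds sqrt_n
--     # (= length of the longest prefix all of whose running products fit).
--     return next((i for i, v in enumerate(prods) if v > sqrt_n), len(prods))
-- ===== Notes on version B (the rewrite author's own statement) =====
-- stated objective: alternative
-- what changed: B splits A's fused multiply-test-break loop into two staged passes: it first builds the complete cumulative-product table with no early exit, then a separate generator search returns the first index whose table entry exceeds sqrt_n (defaulting to the table length); the full table means B does more big-integer work than A on long lists.
import Mathlib
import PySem

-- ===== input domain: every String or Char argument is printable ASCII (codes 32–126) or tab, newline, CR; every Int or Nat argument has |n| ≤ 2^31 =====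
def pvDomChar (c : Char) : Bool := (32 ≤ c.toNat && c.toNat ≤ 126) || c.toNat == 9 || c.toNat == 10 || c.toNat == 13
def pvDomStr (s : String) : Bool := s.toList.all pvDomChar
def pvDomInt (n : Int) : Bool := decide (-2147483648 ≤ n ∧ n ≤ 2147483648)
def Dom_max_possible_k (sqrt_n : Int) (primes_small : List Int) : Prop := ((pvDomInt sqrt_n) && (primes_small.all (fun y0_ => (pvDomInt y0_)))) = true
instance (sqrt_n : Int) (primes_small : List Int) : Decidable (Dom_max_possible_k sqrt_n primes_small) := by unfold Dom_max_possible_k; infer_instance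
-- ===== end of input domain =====

-- B replaces A's fused multiply-test-break loop by two staged passes (full cumulative-product
-- table, then a first-index-exceeding search); alternative decomposition, same cost.


-- ===== PORT A =====
-- A's for-loop with break, as structural recursion over the list carrying (prod, k).
def maxkLoopA (sqrt_n prod k : Int) (ps : List Int) : Int :=
  match ps with
  | [] => k
  | p :: rest => if prod * p ≤ sqrt_n then maxkLoopA sqrt_n (prod * p) (k + 1) rest else k

def max_possible_k (sqrt_n : Int) (primes_small : List Int) : Int :=
  maxkLoopA sqrt_n 1 0 primes_small

-- ===== PORT B =====
-- Stage 1 of Source B: the for-loop appending acc*p, carried as (prods, acc).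
def buildProds (acc : Int) (ps : List Int) : List Int :=
  match ps with
  | [] => []
  | p :: rest => (acc * p) :: buildProds (acc * p) rest

-- Stage 2 of Source B: next((i for i, v in enumerate(prods) if v > sqrt_n), len(prods)).
def firstIdxGT (sqrt_n : Int) (l : List Int) : Nat :=
  match l with
  | [] => 0
  | v :: rest => if sqrt_n < v then 0 else 1 + firstIdxGT sqrt_n rest

def max_possible_k_alt (sqrt_n : Int) (primes_small : List Int) : Int :=
  (firstIdxGT sqrt_n (buildProds 1 primes_small) : Int)

-- ===== PRECONDITION & SPEC =====
def Spec_max_possible_k (sqrt_n : Int) (primes_small : List Int) (out : Int) : Prop := out = max_possible_k_alt sqrt_n primes_small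
instance (sqrt_n : Int) (primes_small : List Int) (out : Int) : Decidable (Spec_max_possible_k sqrt_n primes_small out) := by unfold Spec_max_possible_k; infer_instance

-- ===== CLAIM (what is proved, stated in full; the proofs are below) =====
def Claim_equal_max_possible_k : Prop := ∀ (sqrt_n : Int) (primes_small : List Int), Dom_max_possible_k sqrt_n primes_small → Spec_max_possible_k sqrt_n primes_small (max_possible_k sqrt_n primes_small)

-- ===== LEMMAS AND PROOFS =====
theorem maxkLoopA_eq_firstIdx (sqrt_n : Int) (ps : List Int) :
    ∀ prod k, maxkLoopA sqrt_n prod k ps = k + (firstIdxGT sqrt_n (buildProds prod ps) : Int) := by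
  induction ps with
  | nil => intro prod k; simp [maxkLoopA, buildProds, firstIdxGT]
  | cons p rest ih =>
    intro prod k
    simp only [maxkLoopA, buildProds, firstIdxGT]
    by_cases h : prod * p ≤ sqrt_n
    · rw [if_pos h, if_neg (by omega), ih (prod * p) (k + 1)]
      push_cast
      ring
    · rw [if_neg h, if_pos (by omega)]
      simp

theorem max_possible_k_spec : Claim_equal_max_possible_k := by
  intro sqrt_n primes_small _
  unfold Spec_max_possible_k max_possible_k max_possible_k_alt
  rw [maxkLoopA_eq_firstIdx]
  simp
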